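-- pv_equiv track=rewrite | github.com/Mosder/agh | sem2/asd/kolosy/kol1/kol1.py | findAmountAndNext
-- ===== SOURCE A (Python) =====
-- def findAmountAndNext(arr, last):
--     maxInd = None
--     count = 0
--     for j in range(last):
--         if arr[j] > arr[last]:
--             maxInd = j
--         elif arr[j] < arr[last]:
--             count += 1
--     return count, maxInd
-- ===== SOURCE B (Python) =====
-- def findAmountAndNext(arr, last):
--     count = sum(1 for j in range(last) if arr[j] < arr[last])
--     maxInd = next((j for j in range(last - 1, -1, -1) if arr[j] > arr[last]), None)
--     return count, maxInd
-- ===== Notes on version B (the rewrite author's own statement) =====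
-- stated objective: alternative
-- what changed: Replaces A's single forward loop carrying two pieces of state by two purpose-specific passes: a one-line count of smaller elements and a backward scan that returns the first (i.e. last forward) larger index with early exit.
import Mathlib
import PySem

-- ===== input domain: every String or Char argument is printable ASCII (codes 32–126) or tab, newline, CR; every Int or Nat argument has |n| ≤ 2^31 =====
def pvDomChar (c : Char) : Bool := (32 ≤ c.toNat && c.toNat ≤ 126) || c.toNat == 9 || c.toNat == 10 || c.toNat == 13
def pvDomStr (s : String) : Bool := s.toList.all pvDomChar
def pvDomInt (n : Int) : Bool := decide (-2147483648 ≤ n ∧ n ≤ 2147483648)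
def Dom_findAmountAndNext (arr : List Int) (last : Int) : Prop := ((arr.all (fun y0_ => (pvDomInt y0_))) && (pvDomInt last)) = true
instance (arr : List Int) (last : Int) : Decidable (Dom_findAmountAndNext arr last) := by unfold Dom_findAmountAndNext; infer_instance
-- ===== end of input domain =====

-- B replaces A's single forward loop carrying two pieces of state by two purpose-specific
-- passes: a count of strictly smaller prefix elements, and a backward scan with early exit
-- for the last larger index (objective: alternative decomposition, same cost).

-- ===== PORT A =====
-- A's single forward loop over range(last) with state (count, maxInd).
def findAmountAndNext (arr : List Int) (last : Int) : Int × Option Int :=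
  (PySem.List.pyRange 0 last 1).foldl
    (fun (s : Int × Option Int) j =>
      if PySem.List.pyGetD arr j 0 > PySem.List.pyGetD arr last 0 then (s.1, some j)
      else if PySem.List.pyGetD arr j 0 < PySem.List.pyGetD arr last 0 then (s.1 + 1, s.2)
      else s)
    (0, none)

-- ===== PORT B =====
-- B's two passes: a 0/1 sum over range(last), then next() over range(last-1, -1, -1).
def findAmountAndNext_alt (arr : List Int) (last : Int) : Int × Option Int :=
  let count : Int := (PySem.List.pyRange 0 last 1).foldl
    (fun c j => if PySem.List.pyGetD arr j 0 < PySem.List.pyGetD arr last 0 then c + 1 else c) 0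
  let maxInd : Option Int := (PySem.List.pyRange (last - 1) (-1) (-1)).find?
    (fun j => PySem.List.pyGetD arr j 0 > PySem.List.pyGetD arr last 0)
  (count, maxInd)

-- ===== PRECONDITION & SPEC =====
-- A raises IndexError when 0 < last and last ≥ len(arr); those inputs are excluded (B raises there too).
def Pre_findAmountAndNext (arr : List Int) (last : Int) : Prop := last ≤ 0 ∨ last < arr.length
instance (arr : List Int) (last : Int) : Decidable (Pre_findAmountAndNext arr last) := by unfold Pre_findAmountAndNext; infer_instance
def pvWitness_findAmountAndNext : List Int × Int := ([3, 1, 2, 1], 3)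
def Spec_findAmountAndNext (arr : List Int) (last : Int) (out : Int × Option Int) : Prop := out = findAmountAndNext_alt arr last
instance (arr : List Int) (last : Int) (out : Int × Option Int) : Decidable (Spec_findAmountAndNext arr last out) := by unfold Spec_findAmountAndNext; infer_instance

-- ===== CLAIM (what is proved, stated in full; the proofs are below) =====
def Claim_equal_findAmountAndNext : Prop := ∀ (arr : List Int) (last : Int), Dom_findAmountAndNext arr last → Pre_findAmountAndNext arr last → Spec_findAmountAndNext arr last (findAmountAndNext arr last)

-- ===== LEMMAS AND PROOFS =====

-- A's fold over any index list L equals (B's counting fold, last index in L passing p, default m).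
theorem loop_split (g : Int → Int) (piv : Int) :
    ∀ (L : List Int) (c : Int) (m : Option Int),
      L.foldl (fun (s : Int × Option Int) j =>
          if g j > piv then (s.1, some j)
          else if g j < piv then (s.1 + 1, s.2)
          else s) (c, m)
      = (L.foldl (fun c j => if g j < piv then c + 1 else c) c,
         (L.reverse.find? (fun j => g j > piv)).or m) := by
  intro L
  induction L with
  | nil => intro c m; simp
  | cons x L ih =>
    intro c m
    simp only [List.foldl_cons, List.reverse_cons, List.find?_append]
    by_cases h1 : g x > piv
    · have h2 : ¬ g x < piv := by omega
      simp [h1, h2, ih]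
    · by_cases h2 : g x < piv
      · simp [h1, h2, ih]
      · simp [h1, h2, ih]

-- ===== VERDICT (by name: the statement is the Claim_ definition above) =====
theorem findAmountAndNext_spec : Claim_equal_findAmountAndNext := by
  intro arr last _ _
  unfold Spec_findAmountAndNext findAmountAndNext findAmountAndNext_alt
  rw [loop_split]
  have hrev : PySem.List.pyRange (last - 1) (-1) (-1)
      = (PySem.List.pyRange 0 last 1).reverse := by
    rw [PySem.List.pyRange_neg_one_eq_reverse]
    norm_num
  rw [hrev]
  cases (PySem.List.pyRange 0 last 1).reverse.find?
      (fun j => PySem.List.pyGetD arr j 0 > PySem.List.pyGetD arr last 0) <;>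
    simp
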